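-- pv_equiv track=rewrite | github.com/CkQiao/TS-MSAF-pro | TS-MSAF/pretask3.py | find_consecutive_ones
-- ===== SOURCE A (Python) =====
-- def find_consecutive_ones(numbers):
--     # 初始化结果列表
--     intervals = []
--     start = None
--
--     # 遍历数字列表
--     for i, num in enumerate(numbers):
--         if num == 1:
--             # 如果遇到1，并且start还未设置，则设置start
--             if start is None:
--                 start = i
--         elif start is not None:
--             # 如果遇到0，并且start已设置，则记录区间并重置start
--             intervals.append((start, i - 1))
--             start = None
--
--             # 检查最后一个区间（如果最后一个数字是1）
--     if start is not None:
--         intervals.append((start, len(numbers) - 1))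
--
--     return intervals
-- ===== SOURCE B (Python) =====
-- from itertools import groupby
--
-- def find_consecutive_ones(numbers):
--     intervals = []
--     i = 0
--     for key, grp in groupby(numbers, key=lambda x: x == 1):
--         n = sum(1 for _ in grp)
--         if key:
--             intervals.append((i, i + n - 1))
--         i += n
--     return intervals
-- ===== Notes on version B (the rewrite author's own statement) =====
-- stated objective: idiomatic
-- what changed: Replaced the manual start/None sentinel state machine with itertools.groupby run-grouping keyed on x == 1, advancing a running index by each run's length.
import Mathlib
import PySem

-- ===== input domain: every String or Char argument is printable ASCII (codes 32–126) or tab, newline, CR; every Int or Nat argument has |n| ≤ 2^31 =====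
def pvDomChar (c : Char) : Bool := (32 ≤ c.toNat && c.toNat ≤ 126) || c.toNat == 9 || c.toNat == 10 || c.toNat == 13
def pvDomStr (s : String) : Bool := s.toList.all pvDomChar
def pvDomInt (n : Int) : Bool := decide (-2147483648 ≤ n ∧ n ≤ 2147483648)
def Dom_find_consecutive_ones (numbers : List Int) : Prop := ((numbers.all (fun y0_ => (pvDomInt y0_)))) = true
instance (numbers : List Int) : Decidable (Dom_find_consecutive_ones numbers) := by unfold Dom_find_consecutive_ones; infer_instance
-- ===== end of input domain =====

-- B replaces A's start/None sentinel state machine by groupby-style run-grouping (idiomatic; same O(n) cost).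

-- ===== PORT A =====
-- literal transliteration: loop over enumerate carrying (intervals, start), final flush using len-1
def pvStepA (st : List (Int × Int) × Option Int) (p : Int × Int) : List (Int × Int) × Option Int :=
  if p.2 = 1 then
    match st.2 with
    | none => (st.1, some p.1)
    | some _ => st
  else
    match st.2 with
    | some s => (st.1 ++ [(s, p.1 - 1)], none)
    | none => st

def find_consecutive_ones (numbers : List Int) : List (Int × Int) :=
  let r := (PySem.List.enumerate numbers).foldl pvStepA ([], none)
  match r.2 with
  | some s => r.1 ++ [(s, (numbers.length : Int) - 1)]
  | none => r.1

-- ===== PORT B =====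
-- transliteration of Source B: groupby over the key x == 1; each step consumes one maximal
-- run of equal key (length n = 1 + takeWhile of the tail), emits an interval when the key
-- is true, and advances the running index i by n.
def pvAltGo (i : Int) : List Int → List (Int × Int)
  | [] => []
  | x :: xs =>
    if x = 1 then
      let n : Int := 1 + (xs.takeWhile (fun y => decide (y = 1))).length
      (i, i + n - 1) :: pvAltGo (i + n) (xs.dropWhile (fun y => decide (y = 1)))
    else
      let n : Int := 1 + (xs.takeWhile (fun y => decide (¬ y = 1))).length
      pvAltGo (i + n) (xs.dropWhile (fun y => decide (¬ y = 1)))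
termination_by l => l.length
decreasing_by
  · exact Nat.lt_succ_of_le (List.length_dropWhile_le _ _)
  · exact Nat.lt_succ_of_le (List.length_dropWhile_le _ _)

def find_consecutive_ones_alt (numbers : List Int) : List (Int × Int) :=
  pvAltGo 0 numbers

-- ===== PRECONDITION & SPEC =====
def Spec_find_consecutive_ones (numbers : List Int) (out : List (Int × Int)) : Prop := out = find_consecutive_ones_alt numbers
instance (numbers : List Int) (out : List (Int × Int)) : Decidable (Spec_find_consecutive_ones numbers out) := by unfold Spec_find_consecutive_ones; infer_instance

-- ===== CLAIM (what is proved, stated in full; the proofs are below) =====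
def Claim_equal_find_consecutive_ones : Prop := ∀ (numbers : List Int), Dom_find_consecutive_ones numbers → Spec_find_consecutive_ones numbers (find_consecutive_ones numbers)

-- ===== LEMMAS AND PROOFS =====

-- the final flush of A's loop, as a function of the loop's end state and the total length bound
def pvFlush (r : List (Int × Int) × Option Int) (N : Int) : List (Int × Int) :=
  match r.2 with
  | some s => r.1 ++ [(s, N - 1)]
  | none => r.1

-- A's loop written as structural recursion with explicit index i, current start and accumulator
def pvFA (i : Int) (start : Option Int) (acc : List (Int × Int)) : List Int → List (Int × Int)
  | [] => match start with
          | some s => acc ++ [(s, i - 1)]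
          | none => acc
  | x :: xs =>
    if x = 1 then
      match start with
      | none => pvFA (i + 1) (some i) acc xs
      | some _ => pvFA (i + 1) start acc xs
    else
      match start with
      | some s => pvFA (i + 1) none (acc ++ [(s, i - 1)]) xs
      | none => pvFA (i + 1) none acc xs

theorem pvStepA_one (acc : List (Int × Int)) (start : Option Int) (k x : Int) (hx : x = 1) :
    pvStepA (acc, start) (k, x) = (acc, some (start.getD k)) := by
  cases start <;> simp [pvStepA, hx]

theorem pvStepA_ne_some (acc : List (Int × Int)) (s k x : Int) (hx : ¬ x = 1) :
    pvStepA (acc, some s) (k, x) = (acc ++ [(s, k - 1)], none) := by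
  simp [pvStepA, hx]

theorem pvStepA_ne_none (acc : List (Int × Int)) (k x : Int) (hx : ¬ x = 1) :
    pvStepA (acc, none) (k, x) = (acc, none) := by
  simp [pvStepA, hx]

-- A's fold + final flush equals pvFA (enumerate offset k; the flush value is k + |l| - 1 = final i - 1)
theorem pvA_eq_fA : ∀ (l : List Int) (k : Int) (acc : List (Int × Int)) (start : Option Int),
    pvFlush ((PySem.List.enumerate l k).foldl pvStepA (acc, start)) (k + l.length) = pvFA k start acc l := by
  intro l
  induction l with
  | nil =>
    intro k acc start
    cases start <;> simp [PySem.List.enumerate_nil, pvFlush, pvFA]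
  | cons x xs ih =>
    intro k acc start
    rw [PySem.List.enumerate_cons, List.foldl_cons]
    have hlen : (k : Int) + ((x :: xs).length : Int) = (k + 1) + (xs.length : Int) := by
      push_cast [List.length_cons]; ring
    rw [hlen]
    by_cases hx : x = 1
    · cases start with
      | none =>
        rw [pvStepA_one acc none k x hx, ih]
        simp [pvFA, hx]
      | some s =>
        rw [pvStepA_one acc (some s) k x hx, ih]
        simp [pvFA, hx]
    · cases start with
      | none =>
        rw [pvStepA_ne_none acc k x hx, ih]
        simp [pvFA, hx]
      | some s =>
        rw [pvStepA_ne_some acc s k x hx, ih]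
        simp [pvFA, hx]

-- consuming one non-1 element: pvAltGo absorbs it into (or as) the following non-1 run
theorem pvAltGo_cons_ne (i : Int) (x : Int) (xs : List Int) (hx : ¬ x = 1) :
    pvAltGo i (x :: xs) = pvAltGo (i + 1) xs := by
  cases xs with
  | nil => simp [pvAltGo, hx]
  | cons y ys =>
    by_cases hy : y = 1
    · simp [pvAltGo, hx, hy]
    · rw [pvAltGo, if_neg hx]
      simp only [List.takeWhile, List.dropWhile, hy, decide_not, decide_false,
        Bool.not_false, List.length_cons]
      rw [pvAltGo, if_neg hy]
      simp only [decide_not]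
      congr 1
      push_cast
      ring

-- the core invariant, covering both loop states at once
theorem pvFA_eq_altGo : ∀ (l : List Int),
    (∀ (i : Int) (acc : List (Int × Int)), pvFA i none acc l = acc ++ pvAltGo i l) ∧
    (∀ (i s : Int) (acc : List (Int × Int)),
      pvFA i (some s) acc l =
        acc ++ (s, i + ((l.takeWhile (fun y => decide (y = 1))).length : Int) - 1) ::
          pvAltGo (i + ((l.takeWhile (fun y => decide (y = 1))).length : Int))
            (l.dropWhile (fun y => decide (y = 1)))) := by
  intro l
  induction l with
  | nil =>
    constructor
    · intro i acc; simp [pvFA, pvAltGo]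
    · intro i s acc; simp [pvFA, pvAltGo]
  | cons x xs ih =>
    obtain ⟨ih0, ih1⟩ := ih
    constructor
    · intro i acc
      by_cases hx : x = 1
      · subst hx
        rw [pvFA, if_pos rfl, ih1]
        rw [pvAltGo, if_pos rfl]
        congr 2 <;> ring_nf
      · rw [pvFA, if_neg hx, ih0, pvAltGo_cons_ne i x xs hx]
    · intro i s acc
      by_cases hx : x = 1
      · subst hx
        rw [pvFA, if_pos rfl, ih1]
        simp only [List.takeWhile, List.dropWhile, decide_true, List.length_cons]
        congr 2 <;> push_cast <;> ring_nf
      · rw [pvFA, if_neg hx, ih0]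
        simp only [List.takeWhile, List.dropWhile, hx, decide_false]
        simp only [List.length_nil, Nat.cast_zero, add_zero]
        rw [pvAltGo_cons_ne i x xs hx]
        simp

-- ===== VERDICT (by name: the statement is the Claim_ definition above) =====
theorem find_consecutive_ones_spec : Claim_equal_find_consecutive_ones := by
  intro numbers _
  unfold Spec_find_consecutive_ones find_consecutive_ones find_consecutive_ones_alt
  have h := pvA_eq_fA numbers 0 [] none
  rw [zero_add] at h
  have h2 := (pvFA_eq_altGo numbers).1 0 []
  rw [List.nil_append] at h2
  rw [← h2, ← h]
  simp [pvFlush]
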